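-- pv_equiv track=rewrite | github.com/AmberLee2427/chunky | src/chunky/chunkers/_common.py | _pick_boundary
-- ===== SOURCE A (Python) =====
-- from typing import Dict, List, Optional, Sequence, Set, Tuple
--
-- def _pick_boundary(
--     boundaries: Sequence[int],
--     start_line: int,
--     max_end: int,
--     avoid_boundaries: Set[int],
-- ) -> Optional[int]:
--     """Pick the right-most boundary, preferring positions not marked as avoided."""
--
--     preferred: Optional[int] = None
--     fallback: Optional[int] = None
--     for boundary in boundaries:
--         if boundary <= start_line:
--             continue
--         if boundary > max_end:
--             break
--         fallback = boundary
--         if boundary not in avoid_boundaries: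
--             preferred = boundary
--     return preferred if preferred is not None else fallback
-- ===== SOURCE B (Python) =====
-- from typing import Optional, Sequence, Set
--
--
-- def _pick_boundary(
--     boundaries: Sequence[int],
--     start_line: int,
--     max_end: int,
--     avoid_boundaries: Set[int],
-- ) -> Optional[int]:
--     """Build the candidate window first, then scan it from the right."""
--     window = []
--     for b in boundaries:
--         if b > max_end:
--             break
--         if b > start_line:
--             window.append(b)
--     if not window:
--         return None
--     return next((b for b in reversed(window) if b not in avoid_boundaries), window[-1])
-- ===== Notes on version B (the rewrite author's own statement) =====
-- stated objective: alternative
-- what changed: A's single pass carrying preferred/fallback accumulators is replaced by materializing the in-range window once and then resolving the answer with one right-to-left scan (next over reversed) defaulting to the window's last element.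
import Mathlib
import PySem

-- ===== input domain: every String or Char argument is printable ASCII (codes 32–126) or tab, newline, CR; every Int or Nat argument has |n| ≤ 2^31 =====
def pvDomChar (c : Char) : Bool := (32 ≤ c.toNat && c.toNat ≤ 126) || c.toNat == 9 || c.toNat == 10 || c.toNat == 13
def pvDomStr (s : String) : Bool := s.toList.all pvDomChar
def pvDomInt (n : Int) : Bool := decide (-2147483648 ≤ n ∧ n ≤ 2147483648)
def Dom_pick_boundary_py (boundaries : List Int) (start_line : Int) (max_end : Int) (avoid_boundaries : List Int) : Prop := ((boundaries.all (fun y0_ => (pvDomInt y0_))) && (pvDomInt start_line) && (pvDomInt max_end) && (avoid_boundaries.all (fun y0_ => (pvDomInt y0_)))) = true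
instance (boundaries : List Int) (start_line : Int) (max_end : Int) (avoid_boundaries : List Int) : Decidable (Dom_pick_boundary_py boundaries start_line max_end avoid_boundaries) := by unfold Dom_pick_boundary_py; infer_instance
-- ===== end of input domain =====

-- B rebuilds the answer as window-then-reverse-scan instead of A one-pass accumulators; alternative decomposition, same cost.


-- ===== PORT A =====
-- loop over boundaries carrying (preferred, fallback); break on boundary > max_end
def pickLoopA (bs : List Int) (start_line : Int) (max_end : Int)
    (avoid : List Int) (preferred fallback : Option Int) : Option Int × Option Int :=
  match bs with
  | [] => (preferred, fallback)
  | b :: rest =>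
    if b ≤ start_line then pickLoopA rest start_line max_end avoid preferred fallback
    else if b > max_end then (preferred, fallback)
    else pickLoopA rest start_line max_end avoid
      (if avoid.contains b then preferred else some b) (some b)

def pick_boundary_py (boundaries : List Int) (start_line : Int) (max_end : Int) (avoid_boundaries : List Int) : Option Int :=
  let r := pickLoopA boundaries start_line max_end avoid_boundaries none none
  match r.1 with
  | some p => some p
  | none => r.2

-- ===== PORT B =====
-- build the in-range window first (break on > max_end, keep > start_line)
def altWindow (bs : List Int) (start_line : Int) (max_end : Int) : List Int :=
  match bs with
  | [] => []
  | b :: rest =>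
    if b > max_end then []
    else if b > start_line then b :: altWindow rest start_line max_end
    else altWindow rest start_line max_end

-- next((b for b in l if b not in avoid), None)
def altFirstNotAvoided (l : List Int) (avoid : List Int) : Option Int :=
  match l with
  | [] => none
  | b :: rest => if avoid.contains b then altFirstNotAvoided rest avoid else some b

def pick_boundary_py_alt (boundaries : List Int) (start_line : Int) (max_end : Int) (avoid_boundaries : List Int) : Option Int :=
  match altWindow boundaries start_line max_end with
  | [] => none
  | w =>
    match altFirstNotAvoided w.reverse avoid_boundaries with
    | some b => some b
    | none => w.reverse.head?

-- ===== PRECONDITION & SPEC =====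
def Spec_pick_boundary_py (boundaries : List Int) (start_line : Int) (max_end : Int) (avoid_boundaries : List Int) (out : Option Int) : Prop := out = pick_boundary_py_alt boundaries start_line max_end avoid_boundaries
instance (boundaries : List Int) (start_line : Int) (max_end : Int) (avoid_boundaries : List Int) (out : Option Int) : Decidable (Spec_pick_boundary_py boundaries start_line max_end avoid_boundaries out) := by unfold Spec_pick_boundary_py; infer_instance

-- ===== CLAIM (what is proved, stated in full; the proofs are below) =====
def Claim_equal_pick_boundary_py : Prop := ∀ (boundaries : List Int) (start_line : Int) (max_end : Int) (avoid_boundaries : List Int), Dom_pick_boundary_py boundaries start_line max_end avoid_boundaries → Spec_pick_boundary_py boundaries start_line max_end avoid_boundaries (pick_boundary_py boundaries start_line max_end avoid_boundaries)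

-- ===== LEMMAS AND PROOFS =====

theorem altFirstNotAvoided_append (l : List Int) (b : Int) (avoid : List Int) :
    altFirstNotAvoided (l ++ [b]) avoid =
      match altFirstNotAvoided l avoid with
      | some x => some x
      | none => if avoid.contains b then none else some b := by
  induction l with
  | nil =>
    show (if avoid.contains b then altFirstNotAvoided [] avoid else some b) = _
    by_cases h : avoid.contains b <;> simp [h, altFirstNotAvoided]
  | cons a t ih =>
    show (if avoid.contains a then altFirstNotAvoided (t ++ [b]) avoid else some a) = _
    rw [show altFirstNotAvoided (a :: t) avoid
        = if avoid.contains a then altFirstNotAvoided t avoid else some a from rfl]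
    by_cases h : avoid.contains a
    · rw [if_pos h, if_pos h, ih]
    · rw [if_neg h, if_neg h]

theorem altWindow_empty (l : List Int) (sl me : Int) (h : me < sl) :
    altWindow l sl me = [] := by
  induction l with
  | nil => rfl
  | cons b rest ih =>
    simp only [altWindow]
    by_cases h1 : b > me
    · simp [h1]
    · have h2 : ¬ b > sl := by omega
      simp [h1, h2, ih]

theorem head?_append_single (l : List Int) (b : Int) :
    (l ++ [b]).head? = some (match l.head? with | some x => x | none => b) := by
  cases l <;> rfl

theorem pickLoopA_eq (bs : List Int) (sl me : Int) (avoid : List Int)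
    (p f : Option Int) :
    pickLoopA bs sl me avoid p f =
      ((match altFirstNotAvoided (altWindow bs sl me).reverse avoid with
        | some x => some x
        | none => p),
       (match (altWindow bs sl me).reverse.head? with
        | some x => some x
        | none => f)) := by
  induction bs generalizing p f with
  | nil => simp [pickLoopA, altWindow, altFirstNotAvoided]
  | cons b rest ih =>
    simp only [pickLoopA, altWindow]
    by_cases h1 : b ≤ sl
    · have h1' : ¬ b > sl := by omega
      by_cases h2 : b > me
      · have hlt : me < sl := by omega
        rw [ih, altWindow_empty rest sl me hlt]
        simp [h2, altFirstNotAvoided]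
      · simp only [h1, if_true, h2, if_false, h1']
        exact ih p f
    · have h1' : b > sl := by omega
      by_cases h2 : b > me
      · simp [h1, h2, altFirstNotAvoided]
      · simp only [h1, if_false, h2, if_true, h1']
        by_cases hc : avoid.contains b
        · rw [if_pos hc, ih, List.reverse_cons, altFirstNotAvoided_append,
            head?_append_single, if_pos hc]
          rcases hfa : altFirstNotAvoided (altWindow rest sl me).reverse avoid with _ | x <;>
            rcases hh : (altWindow rest sl me).reverse.head? with _ | y <;>
              simp only [hfa, hh]
        · rw [if_neg hc, ih, List.reverse_cons, altFirstNotAvoided_append,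
            head?_append_single, if_neg hc]
          rcases hfa : altFirstNotAvoided (altWindow rest sl me).reverse avoid with _ | x <;>
            rcases hh : (altWindow rest sl me).reverse.head? with _ | y <;>
              simp only [hfa, hh]

theorem alt_eq (bs : List Int) (sl me : Int) (av : List Int) :
    pick_boundary_py_alt bs sl me av =
      match altFirstNotAvoided (altWindow bs sl me).reverse av with
      | some x => some x
      | none => (altWindow bs sl me).reverse.head? := by
  unfold pick_boundary_py_alt
  rcases hw : altWindow bs sl me with _ | ⟨a, t⟩
  · simp [altFirstNotAvoided]
  · rfl

-- ===== VERDICT (by name: the statement is the Claim_ definition above) =====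
theorem pick_boundary_py_spec : Claim_equal_pick_boundary_py := by
  intro boundaries start_line max_end avoid_boundaries _
  unfold Spec_pick_boundary_py pick_boundary_py
  rw [pickLoopA_eq, alt_eq]
  rcases hfa : altFirstNotAvoided (altWindow boundaries start_line max_end).reverse
      avoid_boundaries with _ | x <;>
    rcases hh : (altWindow boundaries start_line max_end).reverse.head? with _ | y <;>
      simp only [hfa, hh]
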